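-- pv_equiv track=rewrite | github.com/ImmortalDemonGod/RNA_PREDICT | rna_predict/pipeline/stageA/RFold_code.py | visual_get_bases
-- ===== SOURCE A (Python) =====
-- def visual_get_bases(seq):
--     base_map = {"A": [], "U": [], "C": [], "G": []}
--     for ii, s in enumerate(seq):
--         if s in base_map:
--             base_map[s].append(ii + 1)
--
--     def to_comma_str(lst):
--         return ",".join(str(x) for x in lst)
--
--     a_bases = to_comma_str(base_map["A"])
--     u_bases = to_comma_str(base_map["U"])
--     c_bases = to_comma_str(base_map["C"])
--     g_bases = to_comma_str(base_map["G"])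
--     return a_bases, u_bases, c_bases, g_bases
-- ===== SOURCE B (Python) =====
-- def visual_get_bases(seq):
--     def positions(base):
--         return ",".join(str(i + 1) for i, s in enumerate(seq) if s == base)
--     return positions("A"), positions("U"), positions("C"), positions("G")
-- ===== Notes on version B (the rewrite author's own statement) =====
-- stated objective: idiomatic
-- what changed: Replaces the single pass that buckets every position into a dict of four lists with a per-base helper that filters the enumerated sequence and joins directly, so no intermediate dict or lists are built.
import Mathlib
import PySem

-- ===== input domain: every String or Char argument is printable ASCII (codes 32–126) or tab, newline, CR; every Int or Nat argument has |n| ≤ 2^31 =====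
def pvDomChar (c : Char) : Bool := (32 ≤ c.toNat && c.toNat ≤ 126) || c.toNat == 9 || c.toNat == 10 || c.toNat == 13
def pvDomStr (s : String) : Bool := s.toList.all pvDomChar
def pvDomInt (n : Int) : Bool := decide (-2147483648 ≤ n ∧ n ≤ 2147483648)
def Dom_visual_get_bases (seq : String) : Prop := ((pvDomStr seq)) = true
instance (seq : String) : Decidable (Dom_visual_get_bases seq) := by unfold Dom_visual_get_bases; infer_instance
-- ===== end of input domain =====

-- B groups the 1-based positions per base by one filtering helper per base instead of
-- A's single pass bucketing into a dict of four lists (objective: idiomatic decomposition).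

-- ===== PORT A =====
-- the loop body: 'if s in base_map: base_map[s].append(ii + 1)'
def vgbStep (d : PySem.Dict Char (List Int)) (p : Int × Char) : PySem.Dict Char (List Int) :=
  if d.contains p.2 then d.modify p.2 [] (fun l => l ++ [p.1 + 1]) else d

-- '",".join(str(x) for x in lst)'
def toCommaStr (lst : List Int) : String :=
  PySem.Str.join "," (lst.map (fun x => PySem.Int.toStr x))

def visual_get_bases (seq : String) : String × String × String × String :=
  let base_map : PySem.Dict Char (List Int) :=
    PySem.Dict.ofList [('A', []), ('U', []), ('C', []), ('G', [])]
  let base_map := (PySem.List.enumerate seq.toList 0).foldl vgbStep base_map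
  -- base_map["A"] etc.: the four keys are always present, so the lookup never raises
  let a_bases := toCommaStr (base_map.getD 'A' [])
  let u_bases := toCommaStr (base_map.getD 'U' [])
  let c_bases := toCommaStr (base_map.getD 'C' [])
  let g_bases := toCommaStr (base_map.getD 'G' [])
  (a_bases, u_bases, c_bases, g_bases)

-- ===== PORT B =====
-- ','.join(str(i+1) for i, s in enumerate(seq) if s == base)
def vgbPositions (seq : String) (base : Char) : String :=
  PySem.Str.join ","
    (((PySem.List.enumerate seq.toList 0).filter (fun p => p.2 == base)).map
      (fun p => PySem.Int.toStr (p.1 + 1)))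

def visual_get_bases_alt (seq : String) : String × String × String × String :=
  (vgbPositions seq 'A', vgbPositions seq 'U', vgbPositions seq 'C', vgbPositions seq 'G')

-- ===== PRECONDITION & SPEC =====
def Spec_visual_get_bases (seq : String) (out : String × String × String × String) : Prop := out = visual_get_bases_alt seq
instance (seq : String) (out : String × String × String × String) : Decidable (Spec_visual_get_bases seq out) := by unfold Spec_visual_get_bases; infer_instance

-- ===== CLAIM (what is proved, stated in full; the proofs are below) =====
def Claim_equal_visual_get_bases : Prop := ∀ (seq : String), Dom_visual_get_bases seq → Spec_visual_get_bases seq (visual_get_bases seq)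

-- ===== LEMMAS AND PROOFS =====

-- the fold from a literal four-key dict stays a literal four-key dict, each bucket
-- collecting the 1-based positions of its own base
theorem vgb_loop_eq (l : List (Int × Char)) (la lu lc lg : List Int) :
    l.foldl vgbStep (PySem.Dict.mk [('A', la), ('U', lu), ('C', lc), ('G', lg)]) =
      PySem.Dict.mk
        [('A', la ++ (l.filter (fun p => p.2 == 'A')).map (fun p => p.1 + 1)),
         ('U', lu ++ (l.filter (fun p => p.2 == 'U')).map (fun p => p.1 + 1)),
         ('C', lc ++ (l.filter (fun p => p.2 == 'C')).map (fun p => p.1 + 1)),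
         ('G', lg ++ (l.filter (fun p => p.2 == 'G')).map (fun p => p.1 + 1))] := by
  induction l generalizing la lu lc lg with
  | nil => simp
  | cons p t ih =>
    obtain ⟨i, c⟩ := p
    by_cases hA : c = 'A'
    · subst hA
      simp [List.foldl_cons, vgbStep, PySem.Dict.contains, PySem.Dict.modify,
        PySem.Dict.get?, PySem.Dict.insert, PySem.Dict.getD, ih]
    · by_cases hU : c = 'U'
      · subst hU
        simp [List.foldl_cons, vgbStep, PySem.Dict.contains, PySem.Dict.modify,
          PySem.Dict.get?, PySem.Dict.insert, PySem.Dict.getD, ih]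
      · by_cases hC : c = 'C'
        · subst hC
          simp [List.foldl_cons, vgbStep, PySem.Dict.contains, PySem.Dict.modify,
            PySem.Dict.get?, PySem.Dict.insert, PySem.Dict.getD, ih]
        · by_cases hG : c = 'G'
          · subst hG
            simp [List.foldl_cons, vgbStep, PySem.Dict.contains, PySem.Dict.modify,
              PySem.Dict.get?, PySem.Dict.insert, PySem.Dict.getD, ih]
          · have hA' : ¬('A' = c) := fun h => hA (Eq.symm h)
            have hU' : ¬('U' = c) := fun h => hU (Eq.symm h)
            have hC' : ¬('C' = c) := fun h => hC (Eq.symm h)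
            have hG' : ¬('G' = c) := fun h => hG (Eq.symm h)
            simp [List.foldl_cons, vgbStep, PySem.Dict.contains, ih,
              hA, hU, hC, hG, hA', hU', hC', hG']

-- ===== VERDICT (by name: the statement is the Claim_ definition above) =====
theorem visual_get_bases_spec : Claim_equal_visual_get_bases := by
  intro seq _
  show _ = _
  have hinit : PySem.Dict.ofList [('A', ([] : List Int)), ('U', []), ('C', []), ('G', [])]
      = PySem.Dict.mk [('A', []), ('U', []), ('C', []), ('G', [])] := by rfl
  simp only [visual_get_bases, visual_get_bases_alt]
  rw [hinit, vgb_loop_eq]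
  simp [toCommaStr, vgbPositions, PySem.Dict.getD, PySem.Dict.get?, List.map_map]
  exact ⟨rfl, rfl, rfl, rfl⟩
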